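-- pv_equiv track=rewrite | github.com/AceeZai/output_manipulation | use_different_fucntions.py | check_all_uppercase
-- ===== SOURCE A (Python) =====
-- def check_all_uppercase(input_string):
--     has_letter = False
--     for character_value in input_string:
--         if "a" <= character_value <= "z":
--             return False
--         if "A" <= character_value <= "Z":
--             has_letter = True
--     return has_letter
-- ===== SOURCE B (Python) =====
-- def check_all_uppercase(input_string):
--     has_upper = any("A" <= c <= "Z" for c in input_string)
--     has_lower = any("a" <= c <= "z" for c in input_string)
--     return has_upper and not has_lower
-- ===== Notes on version B (the rewrite author's own statement) =====
-- stated objective: simpler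
-- what changed: Replaced the fused early-return loop with flag by two independent any() scans (has_upper, has_lower) combined as has_upper and not has_lower.
import Mathlib
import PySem

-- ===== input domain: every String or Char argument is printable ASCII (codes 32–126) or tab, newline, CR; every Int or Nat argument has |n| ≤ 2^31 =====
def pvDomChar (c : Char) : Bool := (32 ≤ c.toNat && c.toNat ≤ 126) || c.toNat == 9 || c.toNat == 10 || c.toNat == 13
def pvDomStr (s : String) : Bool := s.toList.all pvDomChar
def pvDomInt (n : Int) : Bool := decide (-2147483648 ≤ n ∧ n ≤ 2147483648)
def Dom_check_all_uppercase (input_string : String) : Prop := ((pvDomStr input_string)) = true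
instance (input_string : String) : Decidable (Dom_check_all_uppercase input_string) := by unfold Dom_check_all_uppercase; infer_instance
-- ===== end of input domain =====

-- B replaces A's fused early-return loop with two independent any-scans combined by boolean logic (objective: simpler).


-- ===== PORT A =====
-- literal port of A: one loop, early return False on a lowercase char, flag for an uppercase char
def checkAllUppercaseLoop (cs : List Char) (has_letter : Bool) : Bool :=
  match cs with
  | [] => has_letter
  | c :: rest =>
    if 'a' ≤ c ∧ c ≤ 'z' then false
    else if 'A' ≤ c ∧ c ≤ 'Z' then checkAllUppercaseLoop rest true
    else checkAllUppercaseLoop rest has_letter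

def check_all_uppercase (input_string : String) : Bool :=
  checkAllUppercaseLoop input_string.toList false

-- ===== PORT B =====
def check_all_uppercase_alt (input_string : String) : Bool :=
  let has_upper := input_string.toList.any (fun c => decide ('A' ≤ c ∧ c ≤ 'Z'))
  let has_lower := input_string.toList.any (fun c => decide ('a' ≤ c ∧ c ≤ 'z'))
  has_upper && !has_lower

-- ===== PRECONDITION & SPEC =====
def Spec_check_all_uppercase (input_string : String) (out : Bool) : Prop := out = check_all_uppercase_alt input_string
instance (input_string : String) (out : Bool) : Decidable (Spec_check_all_uppercase input_string out) := by unfold Spec_check_all_uppercase; infer_instance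

-- ===== CLAIM (what is proved, stated in full; the proofs are below) =====
def Claim_equal_check_all_uppercase : Prop := ∀ (input_string : String), Dom_check_all_uppercase input_string → Spec_check_all_uppercase input_string (check_all_uppercase input_string)

-- ===== LEMMAS AND PROOFS =====
theorem checkAllUppercaseLoop_eq (cs : List Char) (flag : Bool) :
    checkAllUppercaseLoop cs flag =
      ((flag || cs.any (fun c => decide ('A' ≤ c ∧ c ≤ 'Z'))) &&
        !cs.any (fun c => decide ('a' ≤ c ∧ c ≤ 'z'))) := by
  induction cs generalizing flag with
  | nil => simp [checkAllUppercaseLoop]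
  | cons c rest ih =>
    simp only [checkAllUppercaseLoop, List.any_cons]
    by_cases hl : 'a' ≤ c ∧ c ≤ 'z'
    · simp [hl]
    · by_cases hu : 'A' ≤ c ∧ c ≤ 'Z' <;> simp [hl, hu, ih]

-- ===== VERDICT (by name: the statement is the Claim_ definition above) =====
theorem check_all_uppercase_spec : Claim_equal_check_all_uppercase := by
  intro s _
  unfold Spec_check_all_uppercase check_all_uppercase check_all_uppercase_alt
  rw [checkAllUppercaseLoop_eq]
  simp [Bool.and_comm]
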